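-- pv_equiv track=rewrite | github.com/aRusenov/fiber-photometry | shock/shock_process.py | find_shock_ranges
-- ===== SOURCE A (Python) =====
-- MAX_TRIALS = 20
--
-- def find_shock_ranges(arr):
--     ranges = []
--     start = None
--
--     for i, val in enumerate(arr):
--         if val == 1:
--             if start is None:
--                 start = i  # start of a new run
--         else:
--             if start is not None:
--                 ranges.append((start, i - 1))
--                 start = None
--
--     # Handle case where array ends with a run of 1s
--     if start is not None:
--         ranges.append((start, len(arr) - 1))
--
--     return ranges[:MAX_TRIALS]
-- ===== SOURCE B (Python) =====
-- MAX_TRIALS = 20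
--
-- def find_shock_ranges(arr):
--     a = list(arr)
--     prevs = [0] + a[:-1]
--     nexts = a[1:] + [0]
--     starts = [i for i, (p, c) in enumerate(zip(prevs, a)) if c == 1 and p != 1]
--     ends = [i for i, (c, nx) in enumerate(zip(a, nexts)) if c == 1 and nx != 1]
--     return list(zip(starts, ends))[:MAX_TRIALS]
-- ===== Notes on version B (the rewrite author's own statement) =====
-- stated objective: alternative
-- what changed: Replaces the stateful single scan with a running start flag by stateless local edge detection: run starts and run ends are collected as two comprehensions over the array zipped with its shifted copies, then paired with zip.
import Mathlib
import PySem

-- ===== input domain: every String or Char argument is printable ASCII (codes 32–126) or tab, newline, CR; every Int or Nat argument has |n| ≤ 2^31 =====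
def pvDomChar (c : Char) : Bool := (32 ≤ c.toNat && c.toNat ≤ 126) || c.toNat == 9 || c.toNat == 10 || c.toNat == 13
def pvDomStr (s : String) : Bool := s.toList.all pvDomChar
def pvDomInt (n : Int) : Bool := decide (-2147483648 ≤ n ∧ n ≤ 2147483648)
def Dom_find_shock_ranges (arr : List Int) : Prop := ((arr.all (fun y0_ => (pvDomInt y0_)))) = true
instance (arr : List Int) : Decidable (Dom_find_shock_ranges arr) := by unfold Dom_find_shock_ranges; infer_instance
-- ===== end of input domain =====

-- B replaces A's stateful run-tracking scan by stateless edge detection (starts/ends found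
-- from the array zipped with its shifted copies, then paired); alternative, same cost.

-- ===== PORT A =====
-- loop body of A's for-loop over enumerate(arr); state = (ranges, start)
def pvStepA (st : List (Int × Int) × Option Int) (p : Int × Int) :
    List (Int × Int) × Option Int :=
  if p.2 = 1 then
    match st.2 with
    | none => (st.1, some p.1)      -- start of a new run
    | some _ => st
  else
    match st.2 with
    | some s => (st.1 ++ [(s, p.1 - 1)], none)
    | none => st

-- the post-loop close of a run that reaches the end of the array (n = len(arr))
def pvFinishA (st : List (Int × Int) × Option Int) (n : Int) : List (Int × Int) :=
  match st.2 with
  | some s => st.1 ++ [(s, n - 1)]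
  | none => st.1

def find_shock_ranges (arr : List Int) : List (Int × Int) :=
  let st := (PySem.List.enumerate arr 0).foldl pvStepA ([], none)
  PySem.List.slice (pvFinishA st (arr.length : Int)) none (some 20)

-- ===== PORT B =====
def find_shock_ranges_alt (arr : List Int) : List (Int × Int) :=
  let a := arr
  let prevs := 0 :: PySem.List.slice a none (some (-1))       -- [0] + a[:-1]
  let nexts := PySem.List.slice a (some 1) none ++ [0]        -- a[1:] + [0]
  let starts := (PySem.List.enumerate (prevs.zip a) 0).filterMap
      (fun q => if q.2.2 = 1 ∧ q.2.1 ≠ 1 then some q.1 else none)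
  let ends := (PySem.List.enumerate (a.zip nexts) 0).filterMap
      (fun q => if q.2.1 = 1 ∧ q.2.2 ≠ 1 then some q.1 else none)
  PySem.List.slice (starts.zip ends) none (some 20)

-- ===== PRECONDITION & SPEC =====
def Spec_find_shock_ranges (arr : List Int) (out : List (Int × Int)) : Prop := out = find_shock_ranges_alt arr
instance (arr : List Int) (out : List (Int × Int)) : Decidable (Spec_find_shock_ranges arr out) := by unfold Spec_find_shock_ranges; infer_instance

-- ===== CLAIM (what is proved, stated in full; the proofs are below) =====
def Claim_equal_find_shock_ranges : Prop := ∀ (arr : List Int), Dom_find_shock_ranges arr → Spec_find_shock_ranges arr (find_shock_ranges arr)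

-- ===== LEMMAS AND PROOFS =====

-- pairsWith p a = zip ([p] + a[:-1]) a : each element with its predecessor (p before the first)
def pairsWith (p : Int) : List Int → List (Int × Int)
  | [] => []
  | c :: t => (p, c) :: pairsWith c t

-- pairsNext a = zip a (a[1:] + [0]) : each element with its successor (0 after the last)
def pairsNext : List Int → List (Int × Int)
  | [] => []
  | c :: t => (c, t.head?.getD 0) :: pairsNext t

-- run-start indices from index i on, given the value p preceding position i
def pvS (p : Int) (i : Int) : List Int → List Int
  | [] => []
  | c :: t => (if c = 1 ∧ p ≠ 1 then [i] else []) ++ pvS c (i + 1) t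

-- run-end indices from index i on (the element after the last is taken as 0)
def pvE (i : Int) : List Int → List Int
  | [] => []
  | c :: t => (if c = 1 ∧ t.head?.getD 0 ≠ 1 then [i] else []) ++ pvE (i + 1) t

theorem zip_prevs (a : List Int) (p : Int) :
    (p :: a.dropLast).zip a = pairsWith p a := by
  induction a generalizing p with
  | nil => simp [pairsWith]
  | cons c t ih =>
    cases t with
    | nil => simp [pairsWith]
    | cons d t' => simpa [pairsWith, List.dropLast] using ih (p := c)

theorem zip_nexts (a : List Int) :
    a.zip (a.tail ++ [0]) = pairsNext a := by
  induction a with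
  | nil => simp [pairsNext]
  | cons c t ih =>
    cases t with
    | nil => simp [pairsNext]
    | cons d t' => simpa [pairsNext] using ih

theorem starts_eq (a : List Int) (p i : Int) :
    (PySem.List.enumerate (pairsWith p a) i).filterMap
      (fun q => if q.2.2 = 1 ∧ q.2.1 ≠ 1 then some q.1 else none) = pvS p i a := by
  induction a generalizing p i with
  | nil => simp [pairsWith, pvS, PySem.List.enumerate_nil]
  | cons c t ih =>
    simp only [pairsWith, pvS, PySem.List.enumerate_cons, List.filterMap_cons]
    by_cases h : c = 1 ∧ p ≠ 1 <;> simp [h, ih]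

theorem ends_eq (a : List Int) (i : Int) :
    (PySem.List.enumerate (pairsNext a) i).filterMap
      (fun q => if q.2.1 = 1 ∧ q.2.2 ≠ 1 then some q.1 else none) = pvE i a := by
  induction a generalizing i with
  | nil => simp [pairsNext, pvE, PySem.List.enumerate_nil]
  | cons c t ih =>
    simp only [pairsNext, pvE, PySem.List.enumerate_cons, List.filterMap_cons]
    rw [ih]
    by_cases h1 : c = 1 <;> by_cases h2 : t.head?.getD 0 = 1 <;> simp [h1, h2]

-- the loop invariant: A's fold with pending state equals the zipped edge lists
theorem main_inv (a : List Int) :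
    (∀ (i : Int) (r : List (Int × Int)) (p : Int), p ≠ 1 →
      pvFinishA ((PySem.List.enumerate a i).foldl pvStepA (r, none)) (i + a.length)
        = r ++ (pvS p i a).zip (pvE i a))
    ∧ (∀ (i : Int) (r : List (Int × Int)) (s : Int),
      pvFinishA ((PySem.List.enumerate a i).foldl pvStepA (r, some s)) (i + a.length)
        = r ++ ((s :: pvS 1 i a).zip
            ((if a.head?.getD 0 ≠ 1 then [i - 1] else []) ++ pvE i a))) := by
  induction a with
  | nil =>
    constructor
    · intro i r p hp; simp [PySem.List.enumerate_nil, pvFinishA, pvS, pvE]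
    · intro i r s; simp [PySem.List.enumerate_nil, pvFinishA, pvS, pvE]
  | cons c t ih =>
    obtain ⟨ihn, ihs⟩ := ih
    have hlen : ∀ i : Int, i + (((c :: t) : List Int).length : Int)
        = (i + 1) + (t.length : Int) := by intro i; simp; ring
    constructor
    · intro i r p hp
      rw [PySem.List.enumerate_cons, List.foldl_cons, hlen i]
      by_cases hc : c = 1
      · subst hc
        have hstep : pvStepA (r, none) (i, 1) = (r, some i) := by simp [pvStepA]
        rw [hstep, ihs (i + 1) r i]
        simp [pvS, pvE, hp]
      · have hstep : pvStepA (r, none) (i, c) = (r, none) := by simp [pvStepA, hc]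
        rw [hstep, ihn (i + 1) r c hc]
        simp [pvS, pvE, hc]
    · intro i r s
      rw [PySem.List.enumerate_cons, List.foldl_cons, hlen i]
      by_cases hc : c = 1
      · subst hc
        have hstep : pvStepA (r, some s) (i, 1) = (r, some s) := by simp [pvStepA]
        rw [hstep, ihs (i + 1) r s]
        simp [pvS, pvE]
      · have hstep : pvStepA (r, some s) (i, c) = (r ++ [(s, i - 1)], none) := by
          simp [pvStepA, hc]
        rw [hstep, ihn (i + 1) (r ++ [(s, i - 1)]) c hc]
        simp [pvS, pvE, hc, List.zip_cons_cons]

theorem portA_eq (arr : List Int) :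
    find_shock_ranges arr
      = PySem.List.slice ((pvS 0 0 arr).zip (pvE 0 arr)) none (some 20) := by
  have h := (main_inv arr).1 0 [] 0 (by norm_num)
  simp only [zero_add] at h
  simp only [find_shock_ranges, h, List.nil_append]

theorem portB_eq (arr : List Int) :
    find_shock_ranges_alt arr
      = PySem.List.slice ((pvS 0 0 arr).zip (pvE 0 arr)) none (some 20) := by
  simp only [find_shock_ranges_alt, PySem.List.slice_to_neg_one, PySem.List.slice_from_one,
    zip_prevs, zip_nexts, starts_eq, ends_eq]

-- ===== VERDICT (by name: the statement is the Claim_ definition above) =====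
theorem find_shock_ranges_spec : Claim_equal_find_shock_ranges := by
  intro arr _
  unfold Spec_find_shock_ranges
  rw [portA_eq, portB_eq]
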